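-- pv_equiv track=rewrite | github.com/ptrebert/creepiest | crplib/numalg/iterators.py | iter_consecutive_blocks
-- ===== SOURCE A (Python) =====
-- def iter_consecutive_blocks(positions):
--     """ Find consecutive blocks in a series of positions,
--     i.e. array indices, and return start:end tuples s.t.
--     access to the array returns all values in [start ... end]
--     :param positions:
--     :return:
--     """
--     start = positions[0]
--     for idx, val in enumerate(positions):
--         try:
--             if val + 1 == positions[idx+1]:
--                 continue
--             else:
--                 yield start, positions[idx] + 1
--                 start = positions[idx + 1]
--         except IndexError:
--             yield start, positions[idx] + 1
--     return
-- ===== SOURCE B (Python) =====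
-- def iter_consecutive_blocks(positions):
--     n = len(positions)
--     breaks = [i for i in range(1, n) if positions[i - 1] + 1 != positions[i]]
--     bounds = [0] + breaks + [n]
--     for s, e in zip(bounds, bounds[1:]):
--         yield positions[s], positions[e - 1] + 1
-- ===== Notes on version B (the rewrite author's own statement) =====
-- stated objective: alternative
-- what changed: Replaces A's single enumerate pass with try/except IndexError lookahead by a staged pipeline: a comprehension first collects all break indices, then consecutive boundary pairs from zip(bounds, bounds[1:]) are mapped to (positions[s], positions[e-1]+1) tuples.
import Mathlib
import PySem

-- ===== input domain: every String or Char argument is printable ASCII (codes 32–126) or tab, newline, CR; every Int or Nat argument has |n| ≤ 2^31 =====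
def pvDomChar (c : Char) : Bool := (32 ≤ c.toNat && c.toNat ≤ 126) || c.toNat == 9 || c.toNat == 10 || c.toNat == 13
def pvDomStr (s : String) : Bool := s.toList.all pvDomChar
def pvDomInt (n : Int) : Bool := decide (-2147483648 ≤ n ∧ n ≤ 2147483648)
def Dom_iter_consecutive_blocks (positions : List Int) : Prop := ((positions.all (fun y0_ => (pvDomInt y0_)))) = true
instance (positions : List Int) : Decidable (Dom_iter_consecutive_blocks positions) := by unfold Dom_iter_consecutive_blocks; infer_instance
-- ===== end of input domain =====

-- B replaces A's single enumerate pass with try/except lookahead by two staged passes: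
-- collect the break indices, then map boundary pairs to tuples (objective: alternative).
-- Both Pythons raise IndexError on the empty list; Pre_ excludes exactly that input.

-- ===== PORT A =====
-- A: start = positions[0]; for idx, val in enumerate(positions): try lookahead positions[idx+1] (none = IndexError).
def aStep (positions : List Int) (st : Int × List (Int × Int)) (iv : Int × Nat) : Int × List (Int × Int) :=
  match positions[iv.2 + 1]? with
  | some nxt =>
    if iv.1 + 1 = nxt then st
    else (nxt, st.2 ++ [(st.1, iv.1 + 1)])
  | none => (st.1, st.2 ++ [(st.1, iv.1 + 1)])

def iter_consecutive_blocks (positions : List Int) : List (Int × Int) :=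
  match positions[0]? with
  | none => []   -- unreachable under Pre_ (Python raises IndexError here)
  | some p0 => (positions.zipIdx.foldl (aStep positions) (p0, [])).2

-- ===== PORT B =====
-- B: breaks = [i for i in range(1, n) if positions[i-1] + 1 != positions[i]];
--    bounds = [0] + breaks + [n]; yield (positions[s], positions[e-1] + 1) for consecutive bound pairs.
--    All indexing in B is in range for nonempty input, so getD is exact there (empty input is outside Pre_).
def iter_consecutive_blocks_alt (positions : List Int) : List (Int × Int) :=
  let n := positions.length
  let breaks := (List.range' 1 (n - 1)).filter
    (fun i => positions.getD (i - 1) 0 + 1 != positions.getD i 0)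
  let bounds := 0 :: (breaks ++ [n])
  (bounds.zip bounds.tail).map
    (fun se => (positions.getD se.1 0, positions.getD (se.2 - 1) 0 + 1))

-- ===== PRECONDITION & SPEC =====
-- Pre_ excludes only the empty list, on which both Pythons raise IndexError.
def Pre_iter_consecutive_blocks (positions : List Int) : Prop := positions ≠ []
instance (positions : List Int) : Decidable (Pre_iter_consecutive_blocks positions) := by unfold Pre_iter_consecutive_blocks; infer_instance
def pvWitness_iter_consecutive_blocks : List Int := [1, 2, 5]

def Spec_iter_consecutive_blocks (positions : List Int) (out : List (Int × Int)) : Prop := out = iter_consecutive_blocks_alt positions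
instance (positions : List Int) (out : List (Int × Int)) : Decidable (Spec_iter_consecutive_blocks positions out) := by unfold Spec_iter_consecutive_blocks; infer_instance

-- ===== CLAIM (what is proved, stated in full; the proofs are below) =====
def Claim_equal_iter_consecutive_blocks : Prop := ∀ (positions : List Int), Dom_iter_consecutive_blocks positions → Pre_iter_consecutive_blocks positions → Spec_iter_consecutive_blocks positions (iter_consecutive_blocks positions)

-- ===== LEMMAS AND PROOFS =====

-- Proof-side bridge: the common "runs" recursion both ports are reduced to.
def altGo (start prev : Int) : List Int → List (Int × Int)
  | [] => [(start, prev + 1)]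
  | v :: vs => if prev + 1 ≠ v then (start, prev + 1) :: altGo v v vs else altGo start v vs

-- consecutive pairs of (s :: l)
def consecP (s : Nat) : List Nat → List (Nat × Nat)
  | [] => []
  | e :: l => (s, e) :: consecP e l

theorem zip_tail_eq_consec : ∀ (l : List Nat) (a : Nat), (a :: l).zip l = consecP a l := by
  intro l
  induction l with
  | nil => intro a; simp [consecP]
  | cons b l' ih => intro a; simp [consecP, List.zip_cons_cons, ih b]

-- A's fold over a suffix (values v :: vs at indices from i) appends exactly altGo's runs for that suffix.
theorem foldl_suffix_eq_altGo (positions : List Int) :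
    ∀ (vs : List Int) (v : Int) (i : Nat) (start : Int) (acc : List (Int × Int)),
    positions.drop i = v :: vs →
    (((v :: vs).zipIdx i).foldl (aStep positions) (start, acc)).2 = acc ++ altGo start v vs := by
  intro vs
  induction vs with
  | nil =>
    intro v i start acc h
    have hnext : positions[i + 1]? = none := by
      have h1 : (positions.drop i)[1]? = positions[i + 1]? := List.getElem?_drop
      rw [h] at h1; simpa using h1.symm
    simp [List.zipIdx, aStep, hnext, altGo]
  | cons w ws ih =>
    intro v i start acc h
    have hnext : positions[i + 1]? = some w := by
      have h1 : (positions.drop i)[1]? = positions[i + 1]? := List.getElem?_drop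
      rw [h] at h1; simpa using h1.symm
    have hdrop : positions.drop (i + 1) = w :: ws := by
      have h2 : List.drop 1 (List.drop i positions) = List.drop (i + 1) positions := List.drop_drop
      rw [← h2, h]; rfl
    rw [List.zipIdx_cons, List.foldl_cons]
    by_cases hc : v + 1 = w
    · have hs : aStep positions (start, acc) (v, i) = (start, acc) := by
        simp [aStep, hnext, hc]
      rw [hs, ih w (i + 1) start acc hdrop]
      simp [altGo, hc]
    · have hs : aStep positions (start, acc) (v, i) = (w, acc ++ [(start, v + 1)]) := by
        simp [aStep, hnext, hc]
      rw [hs, ih w (i + 1) w (acc ++ [(start, v + 1)]) hdrop]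
      simp [altGo, hc]

-- B's staged pipeline over a suffix equals altGo's runs for that suffix.
theorem consec_filter_eq_altGo (q : List Int) :
    ∀ (vs : List Int) (v : Int) (i s : Nat),
    q.drop i = v :: vs →
    ((consecP s (((List.range' (i + 1) vs.length).filter
        (fun j => q.getD (j - 1) 0 + 1 != q.getD j 0)) ++ [q.length])).map
      (fun se => (q.getD se.1 0, q.getD (se.2 - 1) 0 + 1)))
    = altGo (q.getD s 0) v vs := by
  intro vs
  induction vs with
  | nil =>
    intro v i s h
    have hv : q[i]? = some v := by
      have h1 : (q.drop i)[0]? = q[i]? := List.getElem?_drop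
      rw [h] at h1; simpa using h1.symm
    have hi : i < q.length := by
      by_contra hi
      rw [List.getElem?_eq_none (by omega)] at hv
      simp at hv
    have hlen : q.length = i + 1 := by
      have := congrArg List.length h
      simp [List.length_drop] at this
      omega
    have hv' : q[i] = v := by
      have := List.getElem?_eq_getElem hi
      rw [hv] at this; exact (Option.some_inj.mp this).symm
    simp [consecP, altGo, hlen, List.getD_eq_getElem?_getD, hv']
  | cons w ws ih =>
    intro v i s h
    have hv : q[i]? = some v := by
      have h1 : (q.drop i)[0]? = q[i]? := List.getElem?_drop
      rw [h] at h1; simpa using h1.symm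
    have hw : q[i + 1]? = some w := by
      have h1 : (q.drop i)[1]? = q[i + 1]? := List.getElem?_drop
      rw [h] at h1; simpa using h1.symm
    have hdrop : q.drop (i + 1) = w :: ws := by
      have h2 : List.drop 1 (List.drop i q) = List.drop (i + 1) q := List.drop_drop
      rw [← h2, h]; rfl
    have hrange : List.range' (i + 1) (w :: ws).length = (i + 1) :: List.range' (i + 2) ws.length := by
      simp [List.range']
    rw [hrange, List.filter_cons]
    by_cases hc : v + 1 = w
    · have hcond : (q.getD (i + 1 - 1) 0 + 1 != q.getD (i + 1) 0) = false := by
        simp [List.getD_eq_getElem?_getD, hv, hw, hc]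
      rw [hcond]
      simp only [Bool.false_eq_true, if_false]
      rw [ih w (i + 1) s hdrop]
      simp [altGo, hc]
    · have hcond : (q.getD (i + 1 - 1) 0 + 1 != q.getD (i + 1) 0) = true := by
        simp [List.getD_eq_getElem?_getD, hv, hw, hc]
      rw [hcond, if_pos rfl, List.cons_append, consecP, List.map_cons, ih w (i + 1) (i + 1) hdrop]
      simp [altGo, hc, List.getD_eq_getElem?_getD, hv, hw]

-- ===== VERDICT (by name: the statement is the Claim_ definition above) =====
theorem iter_consecutive_blocks_spec : Claim_equal_iter_consecutive_blocks := by
  intro positions _ hpre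
  unfold Spec_iter_consecutive_blocks
  match positions, hpre with
  | p :: rest, _ =>
    unfold iter_consecutive_blocks iter_consecutive_blocks_alt
    simp only [List.getElem?_cons_zero]
    have hA := foldl_suffix_eq_altGo (p :: rest) rest p 0 p [] (by simp)
    have hB := consec_filter_eq_altGo (p :: rest) rest p 0 0 (by simp)
    rw [List.tail_cons, zip_tail_eq_consec]
    simp only [List.length_cons, Nat.add_sub_cancel] at hB ⊢
    rw [hB]
    simpa [List.zipIdx] using hA
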